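-- pv_equiv track=rewrite | github.com/aliwo/swblog | _drafts/joystick_right.py | solution
-- ===== SOURCE A (Python) =====
-- def alter_alpha(to):
--     num = ord(to)
--     return num - 65 if num < 79 else 90 - num + 1
--
-- def alter_cursor(done, i):
--     '''
--     만약 left 와 right 가 같은 경우일 지라도,
--     남아 있는 False 에 따라서 최적해가 다르다.
--     '''
--     left = right = i
--     cnt = 1
--
--     for _ in range(len(done) // 2):
--         left = left - 1 if left > 0 else len(done) - 1
--         right = right + 1 if right < len(done) - 1 else 0
--         if done[right] == False:
--             return right, cnt
--         if done[left] == False: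
--             return left, cnt
--         cnt += 1
--
--     return [-1, 0] # name 이 완성되었음.
--
-- def solution(name):
--     '''
--     done 을 쓰지 않고 해결할 방법은 없을까?
--     '''
--     cnt = 0
--     done = [False] * len(name)
--
--     for i in range(len(name)):
--         if name[i] == 'A':
--             done[i] = True
--
--     i = 0
--     while i != -1:
--         cnt += alter_alpha(name[i])
--         done[i] = True
--         i, alter_cnt = alter_cursor(done, i)
--         cnt += alter_cnt
--     return cnt
-- ===== SOURCE B (Python) =====
-- def alter_alpha(to):
--     num = ord(to)
--     return num - 65 if num < 79 else 90 - num + 1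
--
-- def solution(name):
--     n = len(name)
--     rem = [j for j in range(1, n) if name[j] != 'A']
--     total = alter_alpha(name[0])
--     i = 0
--     while rem:
--         dr = min((j - i) % n for j in rem)
--         dl = min((i - j) % n for j in rem)
--         if dr <= dl:
--             i, step = (i + dr) % n, dr
--         else:
--             i, step = (i - dl) % n, dl
--         total += step + alter_alpha(name[i])
--         rem.remove(i)
--     return total
-- ===== Notes on version B (the rewrite author's own statement) =====
-- stated objective: alternative
-- what changed: B drops A's done-array and its step-by-step expanding left/right cursor scan: it keeps the list of still-unvisited indices and picks the next position arithmetically as the argmin of circular distance (right preferred on ties) via two min() computations, removing the visited index from the list.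
import Mathlib
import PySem

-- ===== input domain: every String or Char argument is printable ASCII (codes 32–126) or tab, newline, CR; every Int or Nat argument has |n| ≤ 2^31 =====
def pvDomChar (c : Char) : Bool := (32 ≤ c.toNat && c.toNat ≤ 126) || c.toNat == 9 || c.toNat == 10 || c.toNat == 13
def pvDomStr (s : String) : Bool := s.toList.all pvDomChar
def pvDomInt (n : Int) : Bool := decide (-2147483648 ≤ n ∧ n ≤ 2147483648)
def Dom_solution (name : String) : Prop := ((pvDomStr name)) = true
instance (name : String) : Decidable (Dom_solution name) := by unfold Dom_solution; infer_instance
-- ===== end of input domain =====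

-- B replaces A's done-array + expanding left/right cursor scan by a list of unvisited
-- indices and an arithmetic circular-distance argmin (alternative decomposition, same cost).

-- ===== PORT A =====
def alterAlpha (c : Char) : Int :=
  let num : Int := c.toNat
  if num < 79 then num - 65 else 90 - num + 1

-- the for-loop of alter_cursor, with early returns; indices stay in [0, len), so
-- pyGetD's default is never read (Python never raises here)
def alterCursorLoop (done : List Bool) (fuel : Nat) (left right cnt : Int) : Int × Int :=
  match fuel with
  | 0 => (-1, 0)
  | f + 1 =>
    let left' := if left > 0 then left - 1 else PySem.List.len done - 1
    let right' := if right < PySem.List.len done - 1 then right + 1 else 0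
    if PySem.List.pyGetD done right' true = false then (right', cnt)
    else if PySem.List.pyGetD done left' true = false then (left', cnt)
    else alterCursorLoop done f left' right' (cnt + 1)

def alterCursor (done : List Bool) (i : Int) : Int × Int :=
  alterCursorLoop done (done.length / 2) i i 1

-- the while-loop of solution; fuel len(name)+1 is enough (each iteration but the last
-- finishes one unvisited index, plus the final check at i = -1)
def solutionLoop (s : List Char) (fuel : Nat) (cnt : Int) (done : List Bool) (i : Int) : Int :=
  match fuel with
  | 0 => cnt
  | f + 1 =>
    if i = -1 then cnt
    else
      let cnt' := cnt + alterAlpha (PySem.List.pyGetD s i ' ')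
      let done' := PySem.List.pySetD done i true
      let r := alterCursor done' i
      solutionLoop s f (cnt' + r.2) done' r.1

def solution (name : String) : Int :=
  let s := name.toList
  let done := (PySem.List.pyRange 0 (PySem.List.len s) 1).foldl
    (fun d k => if PySem.List.pyGetD s k ' ' = 'A' then PySem.List.pySetD d k true else d)
    (List.replicate s.length false)
  solutionLoop s (s.length + 1) 0 done 0

-- ===== PORT B =====  (B shares A's helper alter_alpha, as Source B does)

-- the while-loop of B; fuel = len(rem) exactly (one removal per iteration)
def solutionAltLoop (s : List Char) (fuel : Nat) (total : Int) (rem : List Int) (i : Int) : Int :=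
  match fuel with
  | 0 => total
  | f + 1 =>
    if rem = [] then total
    else
      let n := PySem.List.len s
      let dr := (PySem.List.min? (rem.map (fun j => PySem.Int.mod (j - i) n)) (fun x => x)).getD 0
      let dl := (PySem.List.min? (rem.map (fun j => PySem.Int.mod (i - j) n)) (fun x => x)).getD 0
      let p := if dr ≤ dl then (PySem.Int.mod (i + dr) n, dr) else (PySem.Int.mod (i - dl) n, dl)
      let total' := total + p.2 + alterAlpha (PySem.List.pyGetD s p.1 ' ')
      let rem' := (PySem.List.remove? rem p.1).getD rem
      solutionAltLoop s f total' rem' p.1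

def solution_alt (name : String) : Int :=
  let s := name.toList
  let n := PySem.List.len s
  let rem := (PySem.List.pyRange 1 n 1).filter (fun j => PySem.List.pyGetD s j ' ' ≠ 'A')
  solutionAltLoop s rem.length (alterAlpha (PySem.List.pyGetD s 0 ' ')) rem 0

-- ===== PRECONDITION & SPEC =====
-- Pre_ excludes only the empty string, on which A raises IndexError (name[0]).
def Pre_solution (name : String) : Prop := name ≠ ""
instance (name : String) : Decidable (Pre_solution name) := by unfold Pre_solution; infer_instance
def pvWitness_solution : String := "JEROEN"

def Spec_solution (name : String) (out : Int) : Prop := out = solution_alt name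
instance (name : String) (out : Int) : Decidable (Spec_solution name out) := by unfold Spec_solution; infer_instance

-- ===== CLAIM (what is proved, stated in full; the proofs are below) =====
def Claim_equal_solution : Prop := ∀ (name : String), Dom_solution name → Pre_solution name → Spec_solution name (solution name)

-- ===== LEMMAS AND PROOFS =====

-- index j is still unvisited in done (abbrev so Decidable instances see through it)
abbrev Free (done : List Bool) (j : Nat) : Prop := j < done.length ∧ done.getD j true = false

-- reduce a Nat mod with a bounded argument to plain arithmetic (then omega finishes)
theorem mod2 (a n : Nat) (h : a < 2 * n) (_hn : 0 < n) :
    a % n = if a < n then a else a - n := by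
  split
  · exact Nat.mod_eq_of_lt ‹_›
  · rw [Nat.mod_eq_sub_mod (by omega)]
    exact Nat.mod_eq_of_lt (by omega)

theorem getD_eq_getElem' (l : List Bool) (j : Nat) (d : Bool) (h : j < l.length) :
    l.getD j d = l[j] := by
  simp [List.getD_eq_getElem?_getD, List.getElem?_eq_getElem h]

theorem free_mem (done : List Bool) : false ∈ done ↔ ∃ j, Free done j := by
  rw [List.mem_iff_getElem]
  constructor
  · rintro ⟨j, hj, hv⟩
    exact ⟨j, hj, by rw [getD_eq_getElem' _ _ _ hj, hv]⟩
  · rintro ⟨j, hj, hv⟩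
    exact ⟨j, hj, by rw [getD_eq_getElem' _ _ _ hj] at hv; exact hv⟩

theorem getD_set_eq (l : List Bool) (k j : Nat) (v d : Bool) (hk : k < l.length)
    (hj : j < l.length) :
    (l.set k v).getD j d = if j = k then v else l.getD j d := by
  rw [getD_eq_getElem' _ _ _ (by simpa using hj)]
  split
  · subst ‹j = k›; simp [List.getElem_set_self]
  · rw [List.getElem_set_ne (by omega), getD_eq_getElem' _ _ _ hj]

theorem exR (done : List Bool) (i : Nat) (hi : i < done.length)
    (hit : done.getD i true = true) (hfree : false ∈ done) :
    ∃ d, 0 < d ∧ d ≤ done.length ∧ Free done ((i + d) % done.length) := by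
  rw [free_mem] at hfree
  obtain ⟨j, hj, hv⟩ := hfree
  have hji : j ≠ i := fun h => by rw [h, hit] at hv; simp at hv
  rcases Nat.lt_or_ge i j with h | h
  · exact ⟨j - i, by omega, by omega, by
      rw [mod2 _ _ (by omega) (by omega)]
      have : i + (j - i) = j := by omega
      rw [this, if_pos hj]; exact ⟨hj, hv⟩⟩
  · refine ⟨done.length - (i - j), by omega, by omega, ?_⟩
    rw [mod2 _ _ (by omega) (by omega)]
    have : ¬ i + (done.length - (i - j)) < done.length := by omega
    rw [if_neg this]
    have : i + (done.length - (i - j)) - done.length = j := by omega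
    rw [this]; exact ⟨hj, hv⟩

theorem exL (done : List Bool) (i : Nat) (hi : i < done.length)
    (hit : done.getD i true = true) (hfree : false ∈ done) :
    ∃ d, 0 < d ∧ d ≤ done.length ∧ Free done ((i + (done.length - d)) % done.length) := by
  rw [free_mem] at hfree
  obtain ⟨j, hj, hv⟩ := hfree
  have hji : j ≠ i := fun h => by rw [h, hit] at hv; simp at hv
  rcases Nat.lt_or_ge j i with h | h
  · refine ⟨i - j, by omega, by omega, ?_⟩
    rw [mod2 _ _ (by omega) (by omega)]
    have h2 : ¬ i + (done.length - (i - j)) < done.length := by omega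
    rw [if_neg h2]
    have : i + (done.length - (i - j)) - done.length = j := by omega
    rw [this]; exact ⟨hj, hv⟩
  · refine ⟨done.length - (j - i), by omega, by omega, ?_⟩
    have h2 : done.length - (done.length - (j - i)) = j - i := by omega
    rw [h2, mod2 _ _ (by omega) (by omega), if_pos (by omega)]
    have : i + (j - i) = j := by omega
    rw [this]; exact ⟨hj, hv⟩

-- the value A's cursor scan computes, characterised arithmetically
def cursorRHS (done : List Bool) (i : Nat) (hi : i < done.length)
    (hit : done.getD i true = true) : Int × Int :=
  if hfree : false ∈ done then
    (let n := done.length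
     let dr := Nat.find (exR done i hi hit hfree)
     let dl := Nat.find (exL done i hi hit hfree)
     if dr ≤ dl then ((((i + dr) % n : Nat) : Int), (dr : Int))
     else ((((i + (n - dl)) % n : Nat) : Int), (dl : Int)))
  else (-1, 0)

theorem scan (done : List Bool) (i : Nat) (hi : i < done.length)
    (hit : done.getD i true = true) :
    ∀ (f c : Nat), 1 ≤ c → c + f = done.length / 2 + 1 →
    (∀ t, 1 ≤ t → t < c →
        done.getD ((i + t) % done.length) true = true ∧
        done.getD ((i + (done.length - t)) % done.length) true = true) →
    alterCursorLoop done f (((i + (done.length - (c - 1))) % done.length : Nat) : Int)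
        (((i + (c - 1)) % done.length : Nat) : Int) (c : Int)
      = cursorRHS done i hi hit := by
  intro f
  induction f with
  | zero =>
      intro c h1 h2 hclr
      have hempty : ¬ false ∈ done := by
        intro hfree
        rw [free_mem] at hfree
        obtain ⟨j, hj, hv⟩ := hfree
        have hji : j ≠ i := fun h => by rw [h, hit] at hv; simp at hv
        have : ∃ t, 1 ≤ t ∧ t ≤ done.length / 2 ∧
            ((i + t) % done.length = j ∨ (i + (done.length - t)) % done.length = j) := by
          rcases Nat.lt_or_ge i j with h | h
          · by_cases ht : j - i ≤ done.length / 2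
            · exact ⟨j - i, by omega, ht, Or.inl (by
                rw [mod2 _ _ (by omega) (by omega)]; split <;> omega)⟩
            · refine ⟨done.length - (j - i), by omega, by omega, Or.inr (by
                have : done.length - (done.length - (j - i)) = j - i := by omega
                rw [this, mod2 _ _ (by omega) (by omega)]; split <;> omega)⟩
          · by_cases ht : i - j ≤ done.length / 2
            · refine ⟨i - j, by omega, ht, Or.inr (by
                rw [mod2 _ _ (by omega) (by omega)]; split <;> omega)⟩
            · refine ⟨done.length - (i - j), by omega, by omega, Or.inl (by
                rw [mod2 _ _ (by omega) (by omega)]; split <;> omega)⟩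
        obtain ⟨t, ht1, ht2, ht3⟩ := this
        have := hclr t ht1 (by omega)
        rcases ht3 with h3 | h3
        · rw [h3] at this; rw [this.1] at hv; simp at hv
        · rw [h3] at this; rw [this.2] at hv; simp at hv
      rw [cursorRHS, dif_neg hempty]
      rfl
  | succ f ih =>
      intro c h1 h2 hclr
      have hn : 0 < done.length := by omega
      have hc : c ≤ done.length / 2 := by omega
      have hcn : c < done.length := by omega
      have eL := mod2 (i + (done.length - (c - 1))) done.length (by omega) hn
      have eL' := mod2 (i + (done.length - c)) done.length (by omega) hn
      have eR := mod2 (i + (c - 1)) done.length (by omega) hn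
      have eR' := mod2 (i + c) done.length (by omega) hn
      have hL' : (if (((i + (done.length - (c - 1))) % done.length : Nat) : Int) > 0
            then (((i + (done.length - (c - 1))) % done.length : Nat) : Int) - 1
            else PySem.List.len done - 1)
          = (((i + (done.length - c)) % done.length : Nat) : Int) := by
        simp only [PySem.List.len_eq]
        rw [eL, eL']
        split_ifs <;> push_cast <;> omega
      have hR' : (if (((i + (c - 1)) % done.length : Nat) : Int) < PySem.List.len done - 1
            then (((i + (c - 1)) % done.length : Nat) : Int) + 1
            else 0)
          = (((i + c) % done.length : Nat) : Int) := by
        simp only [PySem.List.len_eq]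
        rw [eR, eR']
        split_ifs <;> push_cast <;> omega
      rw [alterCursorLoop]
      simp only [hL', hR']
      simp only [PySem.List.pyGetD_natCast]
      by_cases hr : done.getD ((i + c) % done.length) true = false
      · rw [if_pos hr]
        have hfree : false ∈ done := by
          rw [free_mem]
          exact ⟨(i + c) % done.length, Nat.mod_lt _ hn, hr⟩
        have hdr : Nat.find (exR done i hi hit hfree) = c := by
          rw [Nat.find_eq_iff]
          refine ⟨⟨h1, by omega, Nat.mod_lt _ hn, hr⟩, ?_⟩
          intro k hk hp
          obtain ⟨hk1, _, _, hkv⟩ := hp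
          have := (hclr k hk1 hk).1
          rw [this] at hkv; simp at hkv
        have hdl : c ≤ Nat.find (exL done i hi hit hfree) := by
          rw [Nat.le_find_iff]
          intro m hm hp
          obtain ⟨hm1, _, _, hmv⟩ := hp
          have := (hclr m hm1 hm).2
          rw [this] at hmv; simp at hmv
        rw [cursorRHS, dif_pos hfree]
        simp only []
        rw [hdr, if_pos (by omega)]
      · rw [if_neg hr]
        have hr' : done.getD ((i + c) % done.length) true = true := by
          cases h : done.getD ((i + c) % done.length) true
          · exact absurd h hr
          · rfl
        by_cases hl : done.getD ((i + (done.length - c)) % done.length) true = false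
        · rw [if_pos hl]
          have hfree : false ∈ done := by
            rw [free_mem]
            exact ⟨(i + (done.length - c)) % done.length, Nat.mod_lt _ hn, hl⟩
          have hdl : Nat.find (exL done i hi hit hfree) = c := by
            rw [Nat.find_eq_iff]
            refine ⟨⟨h1, by omega, Nat.mod_lt _ hn, hl⟩, ?_⟩
            intro k hk hp
            obtain ⟨hk1, _, _, hkv⟩ := hp
            have := (hclr k hk1 hk).2
            rw [this] at hkv; simp at hkv
          have hdr : c + 1 ≤ Nat.find (exR done i hi hit hfree) := by
            rw [Nat.le_find_iff]
            intro m hm hp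
            obtain ⟨hm1, _, _, hmv⟩ := hp
            rcases Nat.lt_or_ge m c with hmc | hmc
            · have := (hclr m hm1 hmc).1
              rw [this] at hmv; simp at hmv
            · have hmc' : m = c := by omega
              rw [hmc', hr'] at hmv; simp at hmv
          rw [cursorRHS, dif_pos hfree]
          simp only []
          rw [hdl, if_neg (by omega)]
        · rw [if_neg hl]
          have := ih (c + 1) (by omega) (by omega) (by
            intro t ht1 ht2
            rcases Nat.lt_or_ge t c with h | h
            · exact hclr t ht1 h
            · have : t = c := by omega
              subst this
              refine ⟨hr', ?_⟩
              cases h : done.getD ((i + (done.length - t)) % done.length) true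
              · exact absurd h hl
              · rfl)
          have e1 : c + 1 - 1 = c := by omega
          rw [e1] at this
          rw [← this]
          push_cast
          ring_nf

-- the value A's cursor scan computes
theorem cursor_char (done : List Bool) (i : Nat) (hi : i < done.length)
    (hit : done.getD i true = true) :
    alterCursor done (i : Int) = cursorRHS done i hi hit := by
  have h0 : ((i + (done.length - (1 - 1))) % done.length) = i := by
    rw [mod2 _ _ (by omega) (by omega)]; split <;> omega
  have h1 : ((i + (1 - 1)) % done.length) = i := by
    rw [mod2 _ _ (by omega) (by omega)]; split <;> omega
  have := scan done i hi hit (done.length / 2) 1 (by omega) (by omega)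
    (by intro t ht1 ht2; omega)
  rw [h0, h1] at this
  exact this

-- Python's (x - y) % n on casts, as a Nat mod
theorem intMod_sub (x y n : Nat) (hx : x < n) (hy : y ≤ n) :
    PySem.Int.mod ((x : Int) - (y : Int)) (n : Int) = (((x + n - y) % n : Nat) : Int) := by
  rw [PySem.Int.mod_eq_emod_of_pos (by omega)]
  have h1 : (x : Int) - (y : Int) = ((x + n - y : Nat) : Int) - (n : Int) := by omega
  rw [h1, Int.sub_emod_right, ← Int.natCast_emod]

theorem intMod_add (x y n : Nat) (_hn : 0 < n) :
    PySem.Int.mod ((x : Int) + (y : Int)) (n : Int) = (((x + y) % n : Nat) : Int) := by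
  have h1 : (x : Int) + (y : Int) = ((x + y : Nat) : Int) := by omega
  rw [h1, PySem.Int.mod_natCast]

theorem rdist_spec (i j n : Nat) (hi : i < n) (hj : j < n) (hne : j ≠ i) :
    0 < (j + n - i) % n ∧ (j + n - i) % n ≤ n ∧ (i + (j + n - i) % n) % n = j := by
  rw [mod2 (j + n - i) n (by omega) (by omega)]
  split_ifs <;>
    (refine ⟨by omega, by omega, ?_⟩) <;>
    (rw [mod2 _ _ (by omega) (by omega)]; split <;> omega)

theorem ldist_spec (i j n : Nat) (hi : i < n) (hj : j < n) (hne : j ≠ i) :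
    0 < (i + n - j) % n ∧ (i + n - j) % n ≤ n ∧
      (i + (n - (i + n - j) % n)) % n = j := by
  rw [mod2 (i + n - j) n (by omega) (by omega)]
  split_ifs <;>
    (refine ⟨by omega, by omega, ?_⟩) <;>
    (rw [mod2 _ _ (by omega) (by omega)]; split <;> omega)

theorem r_round (i d n : Nat) (hi : i < n) (h1 : 0 < d) (h2 : d < n) :
    ((i + d) % n + n - i) % n = d := by
  rw [mod2 (i + d) n (by omega) (by omega)]
  split_ifs <;> (rw [mod2 _ _ (by omega) (by omega)]; split <;> omega)

theorem l_round (i d n : Nat) (hi : i < n) (h1 : 0 < d) (h2 : d < n) :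
    (i + n - (i + (n - d)) % n) % n = d := by
  rw [mod2 (i + (n - d)) n (by omega) (by omega)]
  split_ifs <;> (rw [mod2 _ _ (by omega) (by omega)]; split <;> omega)

theorem self_mod (i n : Nat) (hi : i < n) : (i + n) % n = i := by
  rw [mod2 _ _ (by omega) (by omega)]; split <;> omega

-- the Nat.find of exR is < length (it cannot be the full circle)
theorem find_exR_lt (done : List Bool) (i : Nat) (hi : i < done.length)
    (hit : done.getD i true = true) (hfree : false ∈ done) :
    Nat.find (exR done i hi hit hfree) < done.length := by
  obtain ⟨h0, hle, hf⟩ := Nat.find_spec (exR done i hi hit hfree)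
  rcases Nat.lt_or_ge (Nat.find (exR done i hi hit hfree)) done.length with h | h
  · exact h
  · exfalso
    have he : Nat.find (exR done i hi hit hfree) = done.length := by omega
    rw [he, self_mod i done.length hi] at hf
    rw [hf.2] at hit; simp at hit

theorem find_exL_lt (done : List Bool) (i : Nat) (hi : i < done.length)
    (hit : done.getD i true = true) (hfree : false ∈ done) :
    Nat.find (exL done i hi hit hfree) < done.length := by
  obtain ⟨h0, hle, hf⟩ := Nat.find_spec (exL done i hi hit hfree)
  rcases Nat.lt_or_ge (Nat.find (exL done i hi hit hfree)) done.length with h | h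
  · exact h
  · exfalso
    have he : Nat.find (exL done i hi hit hfree) = done.length := by omega
    rw [he] at hf
    simp only [Nat.sub_self, Nat.add_zero] at hf
    rw [Nat.mod_eq_of_lt hi] at hf
    rw [hf.2] at hit; simp at hit

-- B's right-distance min over rem equals A's dr
theorem dr_eq (done : List Bool) (i : Nat) (hi : i < done.length)
    (hit : done.getD i true = true) (hfree : false ∈ done) (rem : List Int)
    (hmem : ∀ x : Int, x ∈ rem ↔ ∃ j : Nat, x = (j : Int) ∧ Free done j) :
    (PySem.List.min? (rem.map (fun j => PySem.Int.mod (j - (i : Int)) (done.length : Int)))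
        (fun x => x)).getD 0
      = (Nat.find (exR done i hi hit hfree) : Int) := by
  have hf2 := hfree
  rw [free_mem] at hf2
  obtain ⟨j0, hj0⟩ := hf2
  have hrem_ne : rem ≠ [] := by
    intro h
    have := (hmem (j0 : Int)).mpr ⟨j0, rfl, hj0⟩
    rw [h] at this; simp at this
  have hmap_ne :
      rem.map (fun j => PySem.Int.mod (j - (i : Int)) (done.length : Int)) ≠ [] := by
    simpa using hrem_ne
  cases hminEq : PySem.List.min?
      (rem.map (fun j => PySem.Int.mod (j - (i : Int)) (done.length : Int))) (fun x => x) with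
  | none =>
      rw [PySem.List.min?_eq_none_iff] at hminEq
      exact absurd hminEq hmap_ne
  | some m =>
      simp only [Option.getD_some]
      have hmm := PySem.List.min?_mem hminEq
      have hmin := PySem.List.min?_isMin hminEq
      obtain ⟨x, hx, hfx⟩ := List.mem_map.mp hmm
      obtain ⟨j, rfl, hjF⟩ := (hmem x).mp hx
      have hjn : j < done.length := hjF.1
      have hji : j ≠ i := by
        intro h; rw [h] at hjF; rw [hjF.2] at hit; simp at hit
      rw [intMod_sub j i done.length hjn (by omega)] at hfx
      obtain ⟨hd0, hdn, hdj⟩ := rdist_spec i j done.length hi hjn hji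
      have hle1 : Nat.find (exR done i hi hit hfree) ≤ (j + done.length - i) % done.length :=
        Nat.find_min' _ ⟨hd0, hdn, by rw [hdj]; exact hjF⟩
      obtain ⟨he0, hen, heF⟩ := Nat.find_spec (exR done i hi hit hfree)
      have hdlt := find_exR_lt done i hi hit hfree
      have hjd : ((((i + Nat.find (exR done i hi hit hfree)) % done.length : Nat)) : Int) ∈ rem :=
        (hmem _).mpr ⟨_, rfl, heF⟩
      have hle2 := hmin _ (List.mem_map.mpr ⟨_, hjd, rfl⟩)
      simp only [] at hle2
      rw [intMod_sub _ i done.length (Nat.mod_lt _ (by omega)) (by omega),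
        r_round i _ done.length hi he0 hdlt] at hle2
      omega

-- B's left-distance min over rem equals A's dl
theorem dl_eq (done : List Bool) (i : Nat) (hi : i < done.length)
    (hit : done.getD i true = true) (hfree : false ∈ done) (rem : List Int)
    (hmem : ∀ x : Int, x ∈ rem ↔ ∃ j : Nat, x = (j : Int) ∧ Free done j) :
    (PySem.List.min? (rem.map (fun j => PySem.Int.mod ((i : Int) - j) (done.length : Int)))
        (fun x => x)).getD 0
      = (Nat.find (exL done i hi hit hfree) : Int) := by
  have hf2 := hfree
  rw [free_mem] at hf2
  obtain ⟨j0, hj0⟩ := hf2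
  have hrem_ne : rem ≠ [] := by
    intro h
    have := (hmem (j0 : Int)).mpr ⟨j0, rfl, hj0⟩
    rw [h] at this; simp at this
  have hmap_ne :
      rem.map (fun j => PySem.Int.mod ((i : Int) - j) (done.length : Int)) ≠ [] := by
    simpa using hrem_ne
  cases hminEq : PySem.List.min?
      (rem.map (fun j => PySem.Int.mod ((i : Int) - j) (done.length : Int))) (fun x => x) with
  | none =>
      rw [PySem.List.min?_eq_none_iff] at hminEq
      exact absurd hminEq hmap_ne
  | some m =>
      simp only [Option.getD_some]
      have hmm := PySem.List.min?_mem hminEq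
      have hmin := PySem.List.min?_isMin hminEq
      obtain ⟨x, hx, hfx⟩ := List.mem_map.mp hmm
      obtain ⟨j, rfl, hjF⟩ := (hmem x).mp hx
      have hjn : j < done.length := hjF.1
      have hji : j ≠ i := by
        intro h; rw [h] at hjF; rw [hjF.2] at hit; simp at hit
      rw [intMod_sub i j done.length hi (by omega)] at hfx
      obtain ⟨hd0, hdn, hdj⟩ := ldist_spec i j done.length hi hjn hji
      have hle1 : Nat.find (exL done i hi hit hfree) ≤ (i + done.length - j) % done.length :=
        Nat.find_min' _ ⟨hd0, hdn, by rw [hdj]; exact hjF⟩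
      obtain ⟨he0, hen, heF⟩ := Nat.find_spec (exL done i hi hit hfree)
      have hdlt := find_exL_lt done i hi hit hfree
      have hjd : ((((i + (done.length - Nat.find (exL done i hi hit hfree))) % done.length : Nat)) : Int) ∈ rem :=
        (hmem _).mpr ⟨_, rfl, heF⟩
      have hle2 := hmin _ (List.mem_map.mpr ⟨_, hjd, rfl⟩)
      simp only [] at hle2
      rw [intMod_sub i _ done.length hi (by omega),
        l_round i _ done.length hi he0 hdlt] at hle2
      omega

-- one-to-one simulation of A's while-loop by B's while-loop
theorem loop_sim (s : List Char) :
    ∀ (fB : Nat) (rem : List Int) (fA : Nat) (cnt : Int) (done : List Bool) (i : Nat),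
      done.length = s.length → i < s.length →
      rem.Nodup →
      (∀ x : Int, x ∈ rem ↔ ∃ j : Nat, x = (j : Int) ∧ Free (done.set i true) j) →
      fB = rem.length → fB + 2 ≤ fA →
      solutionLoop s fA cnt done (i : Int)
        = solutionAltLoop s fB (cnt + alterAlpha (PySem.List.pyGetD s (i : Int) ' ')) rem (i : Int) := by
  intro fB
  induction fB with
  | zero =>
      intro rem fA cnt done i hlen hi hnd hmem hfB hfA
      have hrem : rem = [] := List.eq_nil_iff_length_eq_zero.mpr hfB.symm
      subst hrem
      obtain ⟨k, rfl⟩ : ∃ k, fA = k + 2 := ⟨fA - 2, by omega⟩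
      have hi' : i < (done.set i true).length := by simp [hlen]; omega
      have hit' : (done.set i true).getD i true = true := by
        rw [getD_set_eq done i i true true (by omega) (by omega)]; simp
      have hfree : ¬ false ∈ (done.set i true) := by
        intro hf
        rw [free_mem] at hf
        obtain ⟨j, hjF⟩ := hf
        have := (hmem (j : Int)).mpr ⟨j, rfl, hjF⟩
        simp at this
      show solutionLoop s (k + 1 + 1) cnt done (i : Int) = _
      rw [solutionLoop, if_neg (by omega : ¬ ((i : Int) = -1))]
      simp only [PySem.List.pySetD_natCast]
      rw [cursor_char (done.set i true) i hi' hit', cursorRHS, dif_neg hfree]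
      rw [solutionLoop, if_pos rfl]
      rw [solutionAltLoop]
      ring_nf
  | succ fb ih =>
      intro rem fA cnt done i hlen hi hnd hmem hfB hfA
      obtain ⟨m, rfl⟩ : ∃ m, fA = m + 1 := ⟨fA - 1, by omega⟩
      have hi' : i < (done.set i true).length := by simp [hlen]; omega
      have hit' : (done.set i true).getD i true = true := by
        rw [getD_set_eq done i i true true (by omega) (by omega)]; simp
      have hlen' : (done.set i true).length = s.length := by simp [hlen]
      have hrem_ne : rem ≠ [] := by
        intro h; rw [h] at hfB; simp at hfB
      have hfree : false ∈ (done.set i true) := by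
        obtain ⟨x, hx⟩ := List.exists_mem_of_ne_nil rem hrem_ne
        obtain ⟨j, rfl, hjF⟩ := (hmem x).mp hx
        rw [free_mem]; exact ⟨j, hjF⟩
      show solutionLoop s (m + 1) cnt done (i : Int) = _
      rw [solutionLoop, if_neg (by omega : ¬ ((i : Int) = -1))]
      simp only [PySem.List.pySetD_natCast]
      rw [cursor_char (done.set i true) i hi' hit', cursorRHS, dif_pos hfree]
      rw [solutionAltLoop, if_neg hrem_ne]
      simp only [PySem.List.len_eq]
      rw [← hlen']
      rw [dr_eq (done.set i true) i hi' hit' hfree rem hmem,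
          dl_eq (done.set i true) i hi' hit' hfree rem hmem]
      set D := done.set i true with hD
      set dR := Nat.find (exR D i hi' hit' hfree) with hdR
      set dL := Nat.find (exL D i hi' hit' hfree) with hdL
      obtain ⟨hR0, hRn, hRF⟩ := Nat.find_spec (exR D i hi' hit' hfree)
      obtain ⟨hL0, hLn, hLF⟩ := Nat.find_spec (exL D i hi' hit' hfree)
      have hDn : 0 < D.length := by omega
      by_cases hdd : dR ≤ dL
      · rw [if_pos hdd, if_pos (by exact_mod_cast hdd : (dR : Int) ≤ (dL : Int))]
        simp only []
        rw [intMod_add i dR D.length hDn]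
        set j' := (i + dR) % D.length with hj'
        have hj'lt : j' < D.length := Nat.mod_lt _ hDn
        have hj'mem : ((j' : Nat) : Int) ∈ rem := (hmem _).mpr ⟨j', rfl, hRF⟩
        rw [PySem.List.remove?_eq_some_erase rem _ hj'mem, Option.getD_some]
        have hmem' : ∀ x : Int, x ∈ rem.erase (j' : Int) ↔
            ∃ j : Nat, x = (j : Int) ∧ Free (D.set j' true) j := by
          intro x
          rw [List.Nodup.mem_erase_iff hnd, hmem]
          constructor
          · rintro ⟨hne, j, rfl, hjF⟩
            refine ⟨j, rfl, by simpa using hjF.1, ?_⟩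
            rw [getD_set_eq D j' j true true hj'lt hjF.1,
              if_neg (by intro h; exact hne (by rw [h]))]
            exact hjF.2
          · rintro ⟨j, rfl, hjlen, hjval⟩
            have hjlen' : j < D.length := by simpa using hjlen
            have hjne : j ≠ j' := by
              intro h
              rw [getD_set_eq D j' j true true hj'lt hjlen', if_pos h] at hjval
              simp at hjval
            rw [getD_set_eq D j' j true true hj'lt hjlen', if_neg hjne] at hjval
            exact ⟨by simpa using hjne, j, rfl, hjlen', hjval⟩
        have := ih (rem.erase (j' : Int)) m (cnt + alterAlpha (PySem.List.pyGetD s (i : Int) ' ') + (dR : Int)) D j'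
          (by simpa using hlen') (by omega) (hnd.erase _) hmem'
          (by rw [List.length_erase_of_mem hj'mem]; omega) (by omega)
        rw [this]
      · rw [if_neg hdd, if_neg (by exact_mod_cast hdd : ¬ (dR : Int) ≤ (dL : Int))]
        simp only []
        have hdLlt := find_exL_lt D i hi' hit' hfree
        rw [intMod_sub i dL D.length (by omega) (by omega)]
        have heq : (i + D.length - dL) % D.length = (i + (D.length - dL)) % D.length := by
          have : i + D.length - dL = i + (D.length - dL) := by omega
          rw [this]
        rw [heq]
        set j' := (i + (D.length - dL)) % D.length with hj'
        have hj'lt : j' < D.length := Nat.mod_lt _ hDn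
        have hj'mem : ((j' : Nat) : Int) ∈ rem := (hmem _).mpr ⟨j', rfl, hLF⟩
        rw [PySem.List.remove?_eq_some_erase rem _ hj'mem, Option.getD_some]
        have hmem' : ∀ x : Int, x ∈ rem.erase (j' : Int) ↔
            ∃ j : Nat, x = (j : Int) ∧ Free (D.set j' true) j := by
          intro x
          rw [List.Nodup.mem_erase_iff hnd, hmem]
          constructor
          · rintro ⟨hne, j, rfl, hjF⟩
            refine ⟨j, rfl, by simpa using hjF.1, ?_⟩
            rw [getD_set_eq D j' j true true hj'lt hjF.1,
              if_neg (by intro h; exact hne (by rw [h]))]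
            exact hjF.2
          · rintro ⟨j, rfl, hjlen, hjval⟩
            have hjlen' : j < D.length := by simpa using hjlen
            have hjne : j ≠ j' := by
              intro h
              rw [getD_set_eq D j' j true true hj'lt hjlen', if_pos h] at hjval
              simp at hjval
            rw [getD_set_eq D j' j true true hj'lt hjlen', if_neg hjne] at hjval
            exact ⟨by simpa using hjne, j, rfl, hjlen', hjval⟩
        have := ih (rem.erase (j' : Int)) m (cnt + alterAlpha (PySem.List.pyGetD s (i : Int) ' ') + (dL : Int)) D j'
          (by simpa using hlen') (by omega) (hnd.erase _) hmem'
          (by rw [List.length_erase_of_mem hj'mem]; omega) (by omega)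
        rw [this]

-- the init loop marks exactly the 'A' positions
theorem init_aux (s : List Char) :
    ∀ (m : Nat), m ≤ s.length →
    ((List.range m).foldl (fun d k => if s.getD k ' ' = 'A' then d.set k true else d)
        (List.replicate s.length false)).length = s.length ∧
    ∀ j, j < s.length →
      ((List.range m).foldl (fun d k => if s.getD k ' ' = 'A' then d.set k true else d)
          (List.replicate s.length false)).getD j true
        = if j < m ∧ s.getD j ' ' = 'A' then true else false := by
  intro m
  induction m with
  | zero =>
      intro _
      refine ⟨by simp, ?_⟩
      intro j hj
      rw [getD_eq_getElem' _ _ _ (by simpa using hj)]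
      simp
  | succ k ihm =>
      intro hm
      obtain ⟨hL, hV⟩ := ihm (by omega)
      rw [List.range_succ, List.foldl_append, List.foldl_cons, List.foldl_nil]
      by_cases hA : s.getD k ' ' = 'A'
      · rw [if_pos hA]
        refine ⟨by simpa using hL, ?_⟩
        intro j hj
        rw [getD_set_eq _ k j true true (by omega) (by omega)]
        by_cases hjk : j = k
        · subst hjk
          rw [if_pos rfl, if_pos ⟨by omega, hA⟩]
        · rw [if_neg hjk, hV j hj]
          by_cases hjA : s.getD j ' ' = 'A'
          · by_cases hjl : j < k
            · rw [if_pos ⟨hjl, hjA⟩, if_pos ⟨by omega, hjA⟩]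
            · rw [if_neg (by rintro ⟨h1', _⟩; exact hjl h1'),
                  if_neg (by rintro ⟨h1', _⟩; exact hjk (by omega))]
          · rw [if_neg (by rintro ⟨_, h2'⟩; exact hjA h2'),
                if_neg (by rintro ⟨_, h2'⟩; exact hjA h2')]
      · rw [if_neg hA]
        refine ⟨hL, ?_⟩
        intro j hj
        rw [hV j hj]
        by_cases hjA : s.getD j ' ' = 'A'
        · have hjk : j ≠ k := by intro h; rw [h] at hjA; exact hA hjA
          by_cases hjl : j < k
          · rw [if_pos ⟨hjl, hjA⟩, if_pos ⟨by omega, hjA⟩]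
          · rw [if_neg (by rintro ⟨h1', _⟩; exact hjl h1'),
                if_neg (by rintro ⟨h1', _⟩; exact hjk (by omega))]
        · rw [if_neg (by rintro ⟨_, h2'⟩; exact hjA h2'),
              if_neg (by rintro ⟨_, h2'⟩; exact hjA h2')]

-- A's init fold over pyRange is the same fold over List.range
theorem init_char (s : List Char) :
    ((PySem.List.pyRange 0 (PySem.List.len s) 1).foldl
        (fun d k => if PySem.List.pyGetD s k ' ' = 'A' then PySem.List.pySetD d k true else d)
        (List.replicate s.length false))
      = (List.range s.length).foldl (fun d k => if s.getD k ' ' = 'A' then d.set k true else d)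
          (List.replicate s.length false) := by
  rw [PySem.List.len_eq, PySem.List.pyRange_one]
  simp [List.foldl_map, PySem.List.pyGetD_natCast, PySem.List.pySetD_natCast]

-- ===== VERDICT (by name: the statement is the Claim_ definition above) =====
theorem solution_spec : Claim_equal_solution := by
  unfold Claim_equal_solution
  intro name _ hpre
  show solution name = solution_alt name
  have hs : name.toList ≠ [] := by
    intro h
    exact hpre (String.toList_eq_nil_iff.mp h)
  have hn : 0 < name.toList.length := List.length_pos_of_ne_nil hs
  unfold solution solution_alt
  simp only [init_char]
  obtain ⟨hL0, hV0⟩ := init_aux name.toList name.toList.length (le_refl _)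
  set s := name.toList with hsdef
  set d0 := (List.range s.length).foldl
      (fun d k => if s.getD k ' ' = 'A' then d.set k true else d)
      (List.replicate s.length false) with hd0
  set rem0 := (PySem.List.pyRange 1 (PySem.List.len s) 1).filter
      (fun j => PySem.List.pyGetD s j ' ' ≠ 'A') with hrem0
  have hnd : rem0.Nodup := List.Nodup.filter _ (PySem.List.nodup_pyRange_one _ _)
  have hmem0 : ∀ x : Int, x ∈ rem0 ↔ ∃ j : Nat, x = (j : Int) ∧ Free (d0.set 0 true) j := by
    intro x
    rw [hrem0, List.mem_filter, PySem.List.mem_pyRange_one, PySem.List.len_eq]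
    constructor
    · rintro ⟨⟨hx1, hx2⟩, hxp⟩
      have hx0 : 0 ≤ x := by omega
      have hxc : x = ((x.toNat : Nat) : Int) := by omega
      refine ⟨x.toNat, hxc, by simp [hL0]; omega, ?_⟩
      rw [getD_set_eq d0 0 x.toNat true true (by omega) (by omega),
        if_neg (by omega : ¬ x.toNat = 0), hV0 x.toNat (by omega)]
      rw [hxc] at hxp
      simp only [PySem.List.pyGetD_natCast, decide_not] at hxp
      rw [if_neg]
      intro hc
      rw [hc.2] at hxp
      simp at hxp
    · rintro ⟨j, rfl, hjlen, hjval⟩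
      have hjlen' : j < s.length := by simpa [hL0] using hjlen
      have hj0 : j ≠ 0 := by
        intro h
        rw [getD_set_eq d0 0 j true true (by omega) (by omega), if_pos h] at hjval
        simp at hjval
      rw [getD_set_eq d0 0 j true true (by omega) (by omega), if_neg hj0,
        hV0 j hjlen'] at hjval
      have hnotA : ¬ s.getD j ' ' = 'A' := by
        intro hA
        rw [if_pos ⟨hjlen', hA⟩] at hjval
        simp at hjval
      refine ⟨⟨by omega, by omega⟩, ?_⟩
      simp only [PySem.List.pyGetD_natCast, decide_not]
      simpa [List.getD_eq_getElem?_getD] using hnotA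
  have hflen : rem0.length + 2 ≤ s.length + 1 := by
    have h1 : rem0.length ≤ (PySem.List.pyRange 1 (PySem.List.len s) 1).length :=
      List.length_filter_le _ _
    rw [PySem.List.length_pyRange_one, PySem.List.len_eq] at h1
    omega
  have hsim := loop_sim s rem0.length rem0 (s.length + 1) 0 d0 0
    hL0 hn hnd hmem0 rfl hflen
  simp only [Nat.cast_zero, zero_add] at hsim ⊢
  exact hsim
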